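-- pv_equiv track=rewrite | github.com/SimpNick6703/Lifer | app.py | can_win_in_n_moves_after_move
-- ===== SOURCE A (Python) =====
-- valid_moves = {
--     0: [1, 3, 4],      # Position 1 can move to 2, 4, 5
--     1: [0, 2, 4],      # Position 2 can move to 1, 3, 5
--     2: [1, 4, 5],      # Position 3 can move to 2, 5, 6
--     3: [0, 4, 6],      # Position 4 can move to 1, 5, 7
--     4: [0, 1, 2, 3, 5, 6, 7, 8],  # Position 5 can move to all adjacent
--     5: [2, 4, 8],      # Position 6 can move to 3, 5, 9
--     6: [3, 4, 7],      # Position 7 can move to 4, 5, 8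
--     7: [4, 6, 8],      # Position 8 can move to 5, 7, 9
--     8: [4, 5, 7]       # Position 9 can move to 5, 6, 8
-- }
--
-- winning_combinations = [
--     [0, 4, 8],  # Diagonal top-left to bottom-right
--     [2, 4, 6],  # Diagonal top-right to bottom-left
--     [1, 4, 7],  # Vertical middle
--     [3, 4, 5],  # Horizontal middle
-- ]
--
-- invalid_moves = [
--     (1, 3), (3, 1),  # 1 <-> 3
--     (3, 7), (7, 3),  # 4 <-> 7
--     (7, 5), (5, 7),  # 7 <-> 5
--     (5, 1), (1, 5),  # 5 <-> 1
-- ]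
--
-- def can_win_in_n_moves_after_move(board, n, current_player):
--     """Helper function to check if player can win in n moves after a move has been made."""
--     # Base case: check if current state is a win
--     if is_winning_position(board, 'black') or is_winning_position(board, 'white'):
--         return True
--
--     if n <= 0:
--         return False
--
--     # Try all possible moves for current player
--     for from_pos in range(9):
--         if board[from_pos] == current_player:
--             for to_pos in valid_moves[from_pos]:
--                 if to_pos in valid_moves[from_pos] and board[to_pos] is None and (from_pos, to_pos) not in invalid_moves:
--                     # Make the move
--                     new_board = board.copy()
--                     new_board[from_pos] = None
--                     new_board[to_pos] = current_player
--
--                     # If this move wins, return True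
--                     if is_winning_position(new_board, current_player):
--                         return True
--
--                     # Otherwise check if opponent can win in n-1 moves
--                     next_player = 'white' if current_player == 'black' else 'black'
--                     if can_win_in_n_moves_after_move(new_board, n-1, next_player):
--                         return True
--
--     return False
--
-- def is_winning_position(board, player):
--     """Check if the current board position is a win for the player."""
--     player_positions = [i for i, piece in enumerate(board) if piece == player]
--
--     # Check each winning combination
--     for combo in winning_combinations:
--         if all(pos in player_positions for pos in combo):
--             return True
--
--     return False
-- ===== SOURCE B (Python) =====
-- # Breadth-first search over deduplicated sets of reachable boards, one level
-- # per move, instead of depth-first recursion over every move sequence.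
--
-- VALID = {
--     0: (1, 3, 4), 1: (0, 2, 4), 2: (1, 4, 5),
--     3: (0, 4, 6), 4: (0, 1, 2, 3, 5, 6, 7, 8), 5: (2, 4, 8),
--     6: (3, 4, 7), 7: (4, 6, 8), 8: (4, 5, 7),
-- }
-- WINS = ((0, 4, 8), (2, 4, 6), (1, 4, 7), (3, 4, 5))
--
--
-- def _wins(board, player):
--     owned = {i for i, piece in enumerate(board) if piece == player}
--     return any(owned.issuperset(combo) for combo in WINS)
--
--
-- def _moves(board, player):
--     for f in range(9):
--         if board[f] == player:
--             for t in VALID[f]: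
--                 if board[t] is None:
--                     nb = list(board)
--                     nb[f] = None
--                     nb[t] = player
--                     yield tuple(nb)
--
--
-- def can_win_in_n_moves_after_move(board, n, current_player):
--     if _wins(board, 'black') or _wins(board, 'white'):
--         return True
--     frontier = {tuple(board)}
--     turn = current_player
--     for _ in range(max(n, 0)):
--         if not frontier:
--             return False
--         frontier = {nb for b in frontier for nb in _moves(b, turn)}
--         if any(_wins(nb, 'black') or _wins(nb, 'white') for nb in frontier):
--             return True
--         turn = 'white' if turn == 'black' else 'black'
--     return False
-- ===== Notes on version B (the rewrite author's own statement) =====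
-- stated objective: alternative
-- what changed: Replaces A's depth-first recursion over every individual move sequence with a breadth-first iteration over deduplicated sets of reachable boards, one level per move; Pre_ excludes boards shorter than 9 with moves left to search (A indexes out of range there, usually raising IndexError) and mover strings other than 'black'/'white' that own a piece on the board (a third player is outside the two-player game's natural domain; a third-player string with no piece stays inside Pre_).
-- outside the precondition, e.g. on can_win_in_n_moves_after_move(['x', None, None, None, 'x', 'x', None, None, None], 1, 'x'): A returns True, B returns False
import Mathlib
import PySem

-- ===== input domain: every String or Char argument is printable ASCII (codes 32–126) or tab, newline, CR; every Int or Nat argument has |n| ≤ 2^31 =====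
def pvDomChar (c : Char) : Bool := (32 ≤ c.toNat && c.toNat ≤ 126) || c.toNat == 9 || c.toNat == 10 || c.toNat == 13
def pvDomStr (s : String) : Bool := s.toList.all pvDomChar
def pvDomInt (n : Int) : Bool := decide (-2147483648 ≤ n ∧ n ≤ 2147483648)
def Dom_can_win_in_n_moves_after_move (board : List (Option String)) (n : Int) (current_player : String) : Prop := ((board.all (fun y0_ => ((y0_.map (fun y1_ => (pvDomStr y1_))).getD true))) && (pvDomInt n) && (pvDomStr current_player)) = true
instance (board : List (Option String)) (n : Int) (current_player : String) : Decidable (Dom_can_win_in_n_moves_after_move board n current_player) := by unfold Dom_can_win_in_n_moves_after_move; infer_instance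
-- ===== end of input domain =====

-- ===== PORT A =====
-- B replaces A's depth-first recursion over move sequences by a breadth-first
-- iteration over deduplicated sets of reachable boards.

-- shared module constants (the dicts/lists at the top of app.py)
def pvAdj (i : Nat) : List Nat :=
  match i with
  | 0 => [1, 3, 4]
  | 1 => [0, 2, 4]
  | 2 => [1, 4, 5]
  | 3 => [0, 4, 6]
  | 4 => [0, 1, 2, 3, 5, 6, 7, 8]
  | 5 => [2, 4, 8]
  | 6 => [3, 4, 7]
  | 7 => [4, 6, 8]
  | 8 => [4, 5, 7]
  | _ => []

def pvCombos : List (List Nat) := [[0, 4, 8], [2, 4, 6], [1, 4, 7], [3, 4, 5]]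

def pvInvalid : List (Nat × Nat) := [(1,3),(3,1),(3,7),(7,3),(7,5),(5,7),(5,1),(1,5)]

-- is_winning_position: positions list, then check each combination
def pvIsWinning (board : List (Option String)) (player : String) : Bool :=
  let positions := (PySem.List.enumerate board 0).filterMap
    (fun ip => if ip.2 = some player then some ip.1 else none)
  pvCombos.any (fun combo => combo.all (fun pos => positions.contains ((pos : Nat) : Int)))

-- A's recursion, with fuel n.toNat standing for the integer countdown n, n-1, ...
-- (n <= 0 is exactly fuel 0; board[i] is getD i none -- exact whenever the index
-- is in range, which holds on Pre_)
def pvAfuel (fuel : Nat) (board : List (Option String)) (current_player : String) : Bool :=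
  if pvIsWinning board "black" || pvIsWinning board "white" then true
  else
    match fuel with
    | 0 => false
    | f + 1 =>
      (List.range 9).any (fun from_pos =>
        if board.getD from_pos none = some current_player then
          (pvAdj from_pos).any (fun to_pos =>
            if (pvAdj from_pos).contains to_pos && board.getD to_pos none = none
                && !(pvInvalid.contains (from_pos, to_pos)) then
              let new_board := (board.set from_pos none).set to_pos (some current_player)
              if pvIsWinning new_board current_player then true
              else
                let next_player := if current_player = "black" then "white" else "black"
                pvAfuel f new_board next_player
            else false)
        else false)

def can_win_in_n_moves_after_move (board : List (Option String)) (n : Int) (current_player : String) : Bool :=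
  pvAfuel n.toNat board current_player

-- ===== PORT B =====
-- _wins of Source B: the set of owned positions, then superset test per combination
def bWins (board : List (Option String)) (player : String) : Bool :=
  let owned : PySem.Set Int := PySem.Set.ofList ((PySem.List.enumerate board 0).filterMap
    (fun ip => if ip.2 = some player then some ip.1 else none))
  pvCombos.any (fun combo => combo.all (fun p => owned.contains ((p : Nat) : Int)))

-- _moves of Source B: all boards reachable by one move of `player`
def bMoves (board : List (Option String)) (player : String) : List (List (Option String)) :=
  (List.range 9).flatMap (fun f =>
    if board.getD f none = some player then
      (pvAdj f).filterMap (fun t =>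
        if board.getD t none = none then
          some ((board.set f none).set t (some player))
        else none)
    else [])

-- Source B's per-level loop: fuel = remaining iterations of 'for _ in range(max(n,0))'
def bLoop (fuel : Nat) (frontier : PySem.Set (List (Option String))) (turn : String) : Bool :=
  match fuel with
  | 0 => false
  | f + 1 =>
    if frontier.isEmpty then false
    else
      let next := PySem.Set.ofList (frontier.flatMap (fun b => bMoves b turn))
      if next.any (fun nb => bWins nb "black" || bWins nb "white") then true
      else bLoop f next (if turn = "black" then "white" else "black")

def can_win_in_n_moves_after_move_alt (board : List (Option String)) (n : Int) (current_player : String) : Bool :=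
  if bWins board "black" || bWins board "white" then true
  else bLoop n.toNat (PySem.Set.ofList [board]) current_player

-- ===== PRECONDITION & SPEC =====
-- Pre_ excludes (a) boards shorter than 9 with moves left to search, where A
-- indexes past the end (usually an IndexError; where an early winning move
-- returns first, B's uniform scan still raises), and (b) player strings other
-- than "black"/"white" that own a piece on the board — a mover that is not one
-- of the game's two players is outside the function's natural domain (a
-- third-player string with no piece on the board stays inside Pre_).
def Pre_can_win_in_n_moves_after_move (board : List (Option String)) (n : Int) (current_player : String) : Prop :=
  (9 ≤ board.length ∨ n ≤ 0 ∨
   (∃ combo ∈ pvCombos, ∀ p ∈ combo, board.getD p none = some "black") ∨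
   (∃ combo ∈ pvCombos, ∀ p ∈ combo, board.getD p none = some "white")) ∧
  (current_player = "black" ∨ current_player = "white" ∨ some current_player ∉ board)
instance (board : List (Option String)) (n : Int) (current_player : String) : Decidable (Pre_can_win_in_n_moves_after_move board n current_player) := by unfold Pre_can_win_in_n_moves_after_move; infer_instance

def pvWitness_can_win_in_n_moves_after_move : List (Option String) × Int × String :=
  ([some "black", none, none, none, some "white", none, none, none, none], 2, "black")

def Spec_can_win_in_n_moves_after_move (board : List (Option String)) (n : Int) (current_player : String) (out : Bool) : Prop := out = can_win_in_n_moves_after_move_alt board n current_player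
instance (board : List (Option String)) (n : Int) (current_player : String) (out : Bool) : Decidable (Spec_can_win_in_n_moves_after_move board n current_player out) := by unfold Spec_can_win_in_n_moves_after_move; infer_instance

-- ===== CLAIM =====
def Claim_equal_can_win_in_n_moves_after_move : Prop := ∀ (board : List (Option String)) (n : Int) (current_player : String), Dom_can_win_in_n_moves_after_move board n current_player → Pre_can_win_in_n_moves_after_move board n current_player → Spec_can_win_in_n_moves_after_move board n current_player (can_win_in_n_moves_after_move board n current_player)

-- ===== LEMMAS AND PROOFS =====

theorem any_congr_mem {α : Type} (l : List α) (p q : α → Bool) (h : ∀ x ∈ l, p x = q x) :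
    l.any p = l.any q := by
  induction l with
  | nil => rfl
  | cons x xs ih => simp [List.any_cons, h x (by simp), ih (fun y hy => h y (by simp [hy]))]

theorem any_ofList {α : Type} [BEq α] [LawfulBEq α] (l : List α) (p : α → Bool) :
    (PySem.Set.ofList l).any p = l.any p := by
  rw [← PySem.List.dedup_eq_ofList]
  rw [Bool.eq_iff_iff]
  simp only [List.any_eq_true]
  constructor
  · rintro ⟨x, hx, hp⟩
    exact ⟨x, (PySem.List.mem_dedup l x).mp hx, hp⟩
  · rintro ⟨x, hx, hp⟩
    exact ⟨x, (PySem.List.mem_dedup l x).mpr hx, hp⟩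

theorem contains_ofList {α : Type} [BEq α] [LawfulBEq α] (l : List α) (x : α) :
    (PySem.Set.ofList l).contains x = l.contains x := by
  rw [← PySem.List.dedup_eq_ofList]
  rw [Bool.eq_iff_iff]
  simp only [PySem.Set.contains, List.contains_eq_mem, decide_eq_true_eq]
  exact PySem.List.mem_dedup l x

theorem wins_eq (board : List (Option String)) (player : String) :
    pvIsWinning board player = bWins board player := by
  simp only [pvIsWinning, bWins, contains_ofList]

theorem moves_any (board : List (Option String)) (cp : String)
    (q : List (Option String) → Bool) :
    ((List.range 9).any (fun from_pos =>
        if board.getD from_pos none = some cp then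
          (pvAdj from_pos).any (fun to_pos =>
            if (pvAdj from_pos).contains to_pos && board.getD to_pos none = none
                && !(pvInvalid.contains (from_pos, to_pos)) then
              q ((board.set from_pos none).set to_pos (some cp))
            else false)
        else false))
    = (bMoves board cp).any q := by
  have hft : ∀ f ∈ List.range 9, ∀ t ∈ pvAdj f,
      (pvAdj f).contains t = true ∧ pvInvalid.contains (f, t) = false := by decide
  rw [bMoves, List.any_flatMap]
  apply any_congr_mem
  intro f hf
  by_cases hb : board.getD f none = some cp
  · rw [if_pos hb, if_pos hb, List.any_filterMap]
    apply any_congr_mem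
    intro t ht
    obtain ⟨hc, hi⟩ := hft f hf t ht
    simp only [hc, hi, Bool.not_false, Bool.and_true, Bool.true_and]
    by_cases hn : board[t]?.getD none = none <;>
      simp [List.getD_eq_getElem?_getD, hn]
  · rw [List.getD_eq_getElem?_getD] at hb
    simp [hb]

theorem pvAfuel_win (m : Nat) (board : List (Option String)) (cp : String)
    (h : (bWins board "black" || bWins board "white") = true) :
    pvAfuel m board cp = true := by
  rw [pvAfuel.eq_def]
  simp [wins_eq, h]

theorem pvAfuel_zero (board : List (Option String)) (cp : String)
    (h : (bWins board "black" || bWins board "white") = false) :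
    pvAfuel 0 board cp = false := by
  rw [pvAfuel.eq_def]
  simp [wins_eq, h]

theorem pvAfuel_succ (f : Nat) (board : List (Option String)) (cp : String)
    (h : (bWins board "black" || bWins board "white") = false) :
    pvAfuel (f + 1) board cp
      = (bMoves board cp).any (fun nb =>
          if pvIsWinning nb cp then true
          else pvAfuel f nb (if cp = "black" then "white" else "black")) := by
  rw [pvAfuel.eq_def]
  rw [← wins_eq, ← wins_eq] at h
  simp only [h, Bool.false_eq_true, if_false]
  exact moves_any board cp (fun nb =>
    if pvIsWinning nb cp then true
    else pvAfuel f nb (if cp = "black" then "white" else "black"))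

theorem loop_eq (m : Nat) : ∀ (F : List (List (Option String))) (turn : String),
    (turn = "white" ∨ turn = "black") →
    (∀ b ∈ F, (bWins b "black" || bWins b "white") = false) →
    bLoop m F turn = F.any (fun b => pvAfuel m b turn) := by
  induction m with
  | zero =>
    intro F turn _ hF
    rw [bLoop]
    rw [Bool.eq_iff_iff]
    simp only [List.any_eq_true, Bool.false_eq_true, false_iff, not_exists, not_and]
    intro b hb hp
    rw [pvAfuel_zero b turn (hF b hb)] at hp
    exact absurd hp (by simp)
  | succ f ih =>
    intro F turn hturn hF
    rw [bLoop]
    have hrhs : F.any (fun b => pvAfuel (f + 1) b turn)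
        = (F.flatMap (fun b => bMoves b turn)).any (fun nb =>
            if pvIsWinning nb turn then true
            else pvAfuel f nb (if turn = "black" then "white" else "black")) := by
      rw [List.any_flatMap]
      exact any_congr_mem _ _ _ (fun b hb => pvAfuel_succ f b turn (hF b hb))
    by_cases hF0 : F.isEmpty
    · rw [if_pos hF0]
      rw [List.isEmpty_iff] at hF0
      subst hF0
      simp [hrhs]
    · rw [if_neg hF0, hrhs]
      set succs := F.flatMap (fun b => bMoves b turn) with hsuccs
      by_cases hs : (PySem.Set.ofList succs).any (fun nb => bWins nb "black" || bWins nb "white") = true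
      · rw [if_pos hs]
        rw [any_ofList, List.any_eq_true] at hs
        obtain ⟨nb, hnb, hw⟩ := hs
        symm
        rw [List.any_eq_true]
        refine ⟨nb, hnb, ?_⟩
        by_cases ht : pvIsWinning nb turn
        · simp [ht]
        · simp [ht, pvAfuel_win f nb _ hw]
      · rw [if_neg hs]
        rw [any_ofList] at hs
        have hs' : succs.any (fun nb => bWins nb "black" || bWins nb "white") = false := by
          simpa using hs
        have hmem : ∀ b ∈ PySem.Set.ofList succs,
            (bWins b "black" || bWins b "white") = false := by
          intro b hb
          rw [← PySem.List.dedup_eq_ofList] at hb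
          have := List.any_eq_false.mp hs' b ((PySem.List.mem_dedup _ _).mp hb)
          simpa using this
        rw [ih (PySem.Set.ofList succs) (if turn = "black" then "white" else "black")
            (by by_cases h : turn = "black" <;> simp [h]) hmem, any_ofList]
        apply any_congr_mem
        intro nb hnb
        have h2 := List.any_eq_false.mp hs' nb hnb
        simp only [Bool.or_eq_true, not_or, Bool.not_eq_true] at h2
        have hT : pvIsWinning nb turn = false := by
          rw [wins_eq]
          rcases hturn with h | h <;> simp [h, h2.1, h2.2]
        simp [hT]

theorem getD_ne_of_not_mem (board : List (Option String)) (cp : String)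
    (h : some cp ∉ board) (f : Nat) : board.getD f none ≠ some cp := by
  rw [List.getD_eq_getElem?_getD]
  cases hx : board[f]? with
  | none => simp
  | some v =>
    have hv : v ∈ board := List.mem_of_getElem? hx
    simp only [Option.getD_some]
    intro he
    exact h (he ▸ hv)

theorem bMoves_nil (board : List (Option String)) (cp : String)
    (h : some cp ∉ board) : bMoves board cp = [] := by
  rw [bMoves]
  refine List.flatMap_eq_nil_iff.mpr ?_
  intro f _
  rw [if_neg (getD_ne_of_not_mem board cp h f)]

theorem bLoop_nil (m : Nat) (turn : String) : bLoop m [] turn = false := by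
  cases m <;> simp [bLoop]

-- ===== VERDICT =====
theorem can_win_in_n_moves_after_move_spec : Claim_equal_can_win_in_n_moves_after_move := by
  intro board n cp _ hpre
  obtain ⟨_, hcp⟩ := hpre
  unfold Spec_can_win_in_n_moves_after_move
  rw [can_win_in_n_moves_after_move, can_win_in_n_moves_after_move_alt]
  by_cases hw : (bWins board "black" || bWins board "white") = true
  · rw [pvAfuel_win _ _ _ hw, if_pos hw]
  · have hw' : (bWins board "black" || bWins board "white") = false := by simpa using hw
    rw [if_neg hw]
    have hone : PySem.Set.ofList [board] = [board] := by
      simp [PySem.Set.ofList, PySem.Set.add]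
    rw [hone]
    rcases hcp with hc | hc | hc
    · rw [loop_eq n.toNat [board] cp (by tauto)
          (by intro b hb; simp only [List.mem_singleton] at hb; subst hb; exact hw')]
      simp
    · rw [loop_eq n.toNat [board] cp (by tauto)
          (by intro b hb; simp only [List.mem_singleton] at hb; subst hb; exact hw')]
      simp
    · -- current_player owns no piece: both searches find no move and return false
      cases hm : n.toNat with
      | zero => rw [pvAfuel_zero _ _ hw', bLoop]
      | succ f =>
        rw [pvAfuel_succ _ _ _ hw', bMoves_nil board cp hc]
        rw [bLoop]
        simp only [List.isEmpty_cons, Bool.false_eq_true, if_false,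
          List.flatMap_singleton, bMoves_nil board cp hc]
        have : PySem.Set.ofList ([] : List (List (Option String))) = [] := rfl
        rw [this]
        simp [bLoop_nil]
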